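-- pv_equiv track=rewrite | github.com/andrewcampi/DotScrape | dsi.py | parse_scrape_content
-- ===== SOURCE A (Python) =====
-- def parse_scrape_content(dot_scrape_content):
--     # Initialize the lists for notes and commands
--     notes = []
--     commands = []
--
--     # Read the contents into a list
--     lines = dot_scrape_content.split('\n')
--
--     # Process the first line to check for notes
--     first_line = lines[0].strip().lower()
--     if "note" in first_line:
--         # Collect all lines until an empty line is found, and add them to the notes list
--         for line in lines[1:]:
--             if line.strip() == "":  # Empty line check
--                 break
--             notes.append(line.strip())
--
--         # The commands start after the empty line and the note block
--         start_index = len(notes) + 2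
--     else:
--         # If there are no notes, commands start from the first line
--         start_index = 0
--
--     # Process the rest of the lines as commands
--     for line in lines[start_index:]:
--         if line.strip():  # Only process lines with characters
--             # Convert line to lowercase and strip escape characters, then add to commands list
--             commands.append(line.strip().replace('\n', '').replace('\r', ''))
--
--     return notes, commands
-- ===== SOURCE B (Python) =====
-- def parse_scrape_content(dot_scrape_content):
--     # One-pass finite state machine over the lines: mode 'header' decides on
--     # the first line, 'notes' collects the note block, 'commands' cleans the
--     # rest.  No slicing, no break, no index arithmetic.
--     notes, commands = [], []
--     state = "header"
--     for line in dot_scrape_content.split('\n'):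
--         s = line.strip()
--         if state == "header":
--             state = "notes" if "note" in s.lower() else "commands"
--             if state == "notes":
--                 continue
--         if state == "notes":
--             if s == "":
--                 state = "commands"
--             else:
--                 notes.append(s)
--             continue
--         if s:
--             commands.append(s.replace('\n', '').replace('\r', ''))
--     return notes, commands
-- ===== Notes on version B (the rewrite author's own statement) =====
-- stated objective: alternative
-- what changed: Replaces A's staged structure (a header test, a note loop with break over a slice, then a second loop over a slice starting at len(notes)+2) with a single-pass finite state machine (header/notes/commands) that visits every line exactly once and never slices or indexes.
import Mathlib
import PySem

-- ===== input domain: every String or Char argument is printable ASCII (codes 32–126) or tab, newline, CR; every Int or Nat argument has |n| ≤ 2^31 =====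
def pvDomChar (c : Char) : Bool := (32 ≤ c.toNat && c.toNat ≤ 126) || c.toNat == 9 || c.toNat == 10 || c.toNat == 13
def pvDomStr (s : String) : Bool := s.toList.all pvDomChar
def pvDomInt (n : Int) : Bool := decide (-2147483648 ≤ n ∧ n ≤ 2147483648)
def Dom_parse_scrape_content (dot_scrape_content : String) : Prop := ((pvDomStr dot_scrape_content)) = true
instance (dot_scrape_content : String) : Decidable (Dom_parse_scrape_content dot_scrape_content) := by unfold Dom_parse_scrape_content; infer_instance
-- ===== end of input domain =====

-- B replaces A's staged slice-based loops (note loop with break, then commands from index len(notes)+2) with a single-pass finite state machine over the lines; alternative decomposition, same O(n) cost.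


-- ===== PORT A =====
-- helper: A's note-collecting loop with break (acc ++ [..] mirrors .append)
def pvNotesLoopA (acc : List String) : List String → List String
  | [] => acc
  | l :: rest =>
      if PySem.Str.strip l == "" then acc
      else pvNotesLoopA (acc ++ [PySem.Str.strip l]) rest

-- helper: line.strip().replace('\n','').replace('\r','')
def pvCmdLineA (line : String) : String :=
  PySem.Str.replace (PySem.Str.replace (PySem.Str.strip line) "\n" "") "\r" ""

def parse_scrape_content (dot_scrape_content : String) : List String × List String :=
  -- s.split('\n'): sep ≠ "", so split? is always some and getD [] is exact
  let lines := (PySem.Str.split? dot_scrape_content "\n").getD []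
  -- str.split('\n') never returns an empty list, so lines[0] cannot raise; headD "" is exact here
  let first_line := PySem.Str.lower (PySem.Str.strip (lines.headD ""))
  let (notes, start_index) :=
    if PySem.Str.isIn "note" first_line then
      let notes := pvNotesLoopA [] (PySem.List.slice lines (some 1) none)
      (notes, ((notes.length : Int) + 2))
    else ([], (0 : Int))
  let commands := (PySem.List.slice lines (some start_index) none).foldl
      (fun acc line => if PySem.Str.strip line == "" then acc else acc ++ [pvCmdLineA line]) []
  (notes, commands)

-- ===== PORT B =====
-- B's loop state: which branch of the state machine the next line is handled by
inductive PvMode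
  | header
  | notes
  | commands
deriving DecidableEq, Repr

-- one iteration of B's for-loop: (state, notes, commands) -> line -> new state
def pvStepB (st : PvMode × List String × List String) (line : String) :
    PvMode × List String × List String :=
  let s := PySem.Str.strip line
  match st.1 with
  | PvMode.header =>
      if PySem.Str.isIn "note" (PySem.Str.lower s) then
        (PvMode.notes, st.2)                  -- state := "notes"; continue
      else if s == "" then (PvMode.commands, st.2)   -- state := "commands"; 'if s' false
      else (PvMode.commands, st.2.1,
            st.2.2 ++ [PySem.Str.replace (PySem.Str.replace s "\n" "") "\r" ""])
  | PvMode.notes =>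
      if s == "" then (PvMode.commands, st.2)        -- blank ends the note block
      else (PvMode.notes, st.2.1 ++ [s], st.2.2)
  | PvMode.commands =>
      if s == "" then st
      else (PvMode.commands, st.2.1,
            st.2.2 ++ [PySem.Str.replace (PySem.Str.replace s "\n" "") "\r" ""])

def parse_scrape_content_alt (dot_scrape_content : String) : List String × List String :=
  -- s.split('\n'): sep ≠ "", so split? is always some and getD [] is exact
  let lines := (PySem.Str.split? dot_scrape_content "\n").getD []
  let r := lines.foldl pvStepB (PvMode.header, [], [])
  (r.2.1, r.2.2)

-- ===== PRECONDITION & SPEC =====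
def Spec_parse_scrape_content (dot_scrape_content : String) (out : List String × List String) : Prop := out = parse_scrape_content_alt dot_scrape_content
instance (dot_scrape_content : String) (out : List String × List String) : Decidable (Spec_parse_scrape_content dot_scrape_content out) := by unfold Spec_parse_scrape_content; infer_instance

-- ===== CLAIM (what is proved, stated in full; the proofs are below) =====
def Claim_equal_parse_scrape_content : Prop := ∀ (dot_scrape_content : String), Dom_parse_scrape_content dot_scrape_content → Spec_parse_scrape_content dot_scrape_content (parse_scrape_content dot_scrape_content)

-- ===== LEMMAS AND PROOFS =====

-- proof-side helper: split the line list at the first blank-stripped line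
def pvSplitBlank : List String → List String × List String
  | [] => ([], [])
  | l :: rest =>
      let s := PySem.Str.strip l
      if s == "" then ([], rest)
      else
        let p := pvSplitBlank rest
        (s :: p.1, p.2)

-- A's append-accumulator note loop computes the first component of pvSplitBlank
theorem pvNotesLoopA_eq (xs : List String) (acc : List String) :
    pvNotesLoopA acc xs = acc ++ (pvSplitBlank xs).1 := by
  induction xs generalizing acc with
  | nil => simp [pvNotesLoopA, pvSplitBlank]
  | cons l rest ih =>
    by_cases h : PySem.Str.strip l == ""
    · simp [pvNotesLoopA, pvSplitBlank, h]
    · simp [pvNotesLoopA, pvSplitBlank, h, ih]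

-- dropping len(notes)+1 lines lands exactly on the after-blank remainder
theorem pvSplitBlank_drop (xs : List String) :
    xs.drop ((pvSplitBlank xs).1.length + 1) = (pvSplitBlank xs).2 := by
  induction xs with
  | nil => simp [pvSplitBlank]
  | cons l rest ih =>
    by_cases h : PySem.Str.strip l == ""
    · simp [pvSplitBlank, h]
    · simp [pvSplitBlank, h, ih]

-- in commands mode, B's fold is exactly A's command fold
theorem pvFoldB_commands (xs : List String) (ns cs : List String) :
    xs.foldl pvStepB (PvMode.commands, ns, cs)
      = (PvMode.commands, ns,
         xs.foldl (fun acc line =>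
           if PySem.Str.strip line == "" then acc else acc ++ [pvCmdLineA line]) cs) := by
  induction xs generalizing cs with
  | nil => simp
  | cons l rest ih =>
    cases h : PySem.Str.strip l == "" with
    | true =>
      have h' : PySem.Str.strip l = "" := by simpa using h
      simp [pvStepB, h, h', ih, pvCmdLineA]
    | false =>
      have h' : ¬ PySem.Str.strip l = "" := by simpa using h
      simp [pvStepB, h, h', ih, pvCmdLineA]

-- in notes mode, B's fold collects the pre-blank block then runs the command fold on the rest
theorem pvFoldB_notes (xs : List String) (ns : List String) :
    (xs.foldl pvStepB (PvMode.notes, ns, [])).2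
      = (ns ++ (pvSplitBlank xs).1,
         (pvSplitBlank xs).2.foldl (fun acc line =>
           if PySem.Str.strip line == "" then acc else acc ++ [pvCmdLineA line]) []) := by
  induction xs generalizing ns with
  | nil => simp [pvSplitBlank]
  | cons l rest ih =>
    cases h : PySem.Str.strip l == "" with
    | true =>
      have h' : PySem.Str.strip l = "" := by simpa using h
      simp [pvStepB, pvSplitBlank, h, h', pvFoldB_commands]
    | false =>
      have h' : ¬ PySem.Str.strip l = "" := by simpa using h
      simp [pvStepB, pvSplitBlank, h, h', ih]

-- ===== VERDICT (by name: the statement is the Claim_ definition above) =====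
theorem parse_scrape_content_spec : Claim_equal_parse_scrape_content := by
  unfold Claim_equal_parse_scrape_content
  intro s _
  unfold Spec_parse_scrape_content parse_scrape_content parse_scrape_content_alt
  cases hL : (PySem.Str.split? s "\n").getD [] with
  | nil => decide
  | cons first rest =>
    by_cases hnote : PySem.Str.isIn "note" (PySem.Str.lower (PySem.Str.strip first)) = true
    · simp only [List.headD_cons, hnote, if_pos, List.foldl_cons, pvStepB,
        PySem.List.slice_from_one, List.tail_cons, pvNotesLoopA_eq, List.nil_append,
        pvFoldB_notes]
      rw [PySem.List.slice_from _ (by positivity)]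
      have h2 : (((pvSplitBlank rest).1.length : Int) + 2).toNat
          = (pvSplitBlank rest).1.length + 2 := by omega
      rw [h2]
      simp only [List.drop_succ_cons, pvSplitBlank_drop]
    · simp only [List.headD_cons, if_neg hnote, PySem.List.slice_zero_start,
        PySem.List.slice_none_none, List.foldl_cons]
      have hstep : pvStepB (PvMode.header, [], []) first =
          if PySem.Str.isIn "note" (PySem.Str.lower (PySem.Str.strip first)) then
            (PvMode.notes, ([], []))
          else if PySem.Str.strip first == "" then (PvMode.commands, ([], []))
          else (PvMode.commands, ([], [pvCmdLineA first])) := rfl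
      rw [hstep, if_neg hnote]
      cases hb : PySem.Str.strip first == "" with
      | true => simp [pvFoldB_commands]
      | false => simp [pvFoldB_commands, pvCmdLineA]
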